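-- pv_equiv track=rewrite | github.com/KolmogorovLab/Wakhan | src/hapcorrect/src/phase_correction.py | phase_correction_centers
-- ===== SOURCE A (Python) =====
-- def phase_correction_centers(arguments, segs_hp1_state, segs_hp1_start, segs_hp1_end,  segs_hp2_state, segs_hp2_start, segs_hp2_end, haplotype_1_values, haplotype_2_values):
--
--     diff_hp1 = []
--     for index, (start, end, state) in enumerate(zip(segs_hp1_start, segs_hp1_end, segs_hp1_state)):
--         diff_hp1.append([end - start, index, state])
--     diff_hp1.sort(key=lambda x: x[0])
--     max_diff_hp1 = diff_hp1[-1]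
--
--     diff_hp2 = []
--     for index, (start, end, state) in enumerate(zip(segs_hp2_start, segs_hp2_end, segs_hp2_state)):
--         diff_hp2.append([end - start, index, state])
--     diff_hp2.sort(key=lambda x: x[0])
--     max_diff_hp2 = diff_hp2[-1]
--     processed = False
--     #if not ( (len(set(segs_hp2_state)) == 1 or any(segs_hp2_state) < 5) or (len(set(segs_hp1_state)) == 1 or any(segs_hp1_state) < 5) ):
--     if not max_diff_hp1[2] == max_diff_hp2[2]:
--         processed = True
--         for index, (start, end, state) in enumerate(zip(segs_hp2_start, segs_hp2_end, segs_hp2_state)):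
--             if state == max_diff_hp1[2]:
--                 for i in range(start//arguments['bin_size'],end//arguments['bin_size']):
--                     new_hp2 = haplotype_2_values[i]
--                     new_hp1 = haplotype_1_values[i]
--                     haplotype_1_values[i] = new_hp2
--                     haplotype_2_values[i] = new_hp1
--
--         for index, (start, end, state) in enumerate(zip(segs_hp1_start, segs_hp1_end, segs_hp1_state)):
--             if state == max_diff_hp2[2]:
--                 for i in range(start//arguments['bin_size'],end//arguments['bin_size']):
--                     new_hp2 = haplotype_2_values[i]
--                     new_hp1 = haplotype_1_values[i]
--                     haplotype_1_values[i] = new_hp2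
--                     haplotype_2_values[i] = new_hp1
--
--     return haplotype_1_values, haplotype_2_values, processed
-- ===== SOURCE B (Python) =====
-- def phase_correction_centers(arguments, segs_hp1_state, segs_hp1_start, segs_hp1_end, segs_hp2_state, segs_hp2_start, segs_hp2_end, haplotype_1_values, haplotype_2_values):
--     def dominant_state(starts, ends, states):
--         # single linear pass; ties keep the LAST largest segment (>=), like a stable sort's last element
--         best = None
--         for start, end, state in zip(starts, ends, states):
--             if best is None or end - start >= best[0]:
--                 best = (end - start, state)
--         return None if best is None else best[1]
--
--     best_state_hp1 = dominant_state(segs_hp1_start, segs_hp1_end, segs_hp1_state)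
--     best_state_hp2 = dominant_state(segs_hp2_start, segs_hp2_end, segs_hp2_state)
--     processed = best_state_hp1 != best_state_hp2
--     if processed:
--         bins = [i for start, end, state in zip(segs_hp2_start, segs_hp2_end, segs_hp2_state)
--                 if state == best_state_hp1
--                 for i in range(start // arguments['bin_size'], end // arguments['bin_size'])]
--         bins += [i for start, end, state in zip(segs_hp1_start, segs_hp1_end, segs_hp1_state)
--                  if state == best_state_hp2
--                  for i in range(start // arguments['bin_size'], end // arguments['bin_size'])]
--         for i in bins:
--             haplotype_1_values[i], haplotype_2_values[i] = haplotype_2_values[i], haplotype_1_values[i]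
--     return haplotype_1_values, haplotype_2_values, processed
-- ===== Notes on version B (the rewrite author's own statement) =====
-- stated objective: faster
-- what changed: B replaces A's build-triples/stable-sort/take-last selection of each haplotype's dominant state by a single O(n) scan keeping the last largest segment (>=), and replaces A's two nested conditional swap loops by one flat comprehension collecting all bin indices followed by a single swap loop.
import Mathlib
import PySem

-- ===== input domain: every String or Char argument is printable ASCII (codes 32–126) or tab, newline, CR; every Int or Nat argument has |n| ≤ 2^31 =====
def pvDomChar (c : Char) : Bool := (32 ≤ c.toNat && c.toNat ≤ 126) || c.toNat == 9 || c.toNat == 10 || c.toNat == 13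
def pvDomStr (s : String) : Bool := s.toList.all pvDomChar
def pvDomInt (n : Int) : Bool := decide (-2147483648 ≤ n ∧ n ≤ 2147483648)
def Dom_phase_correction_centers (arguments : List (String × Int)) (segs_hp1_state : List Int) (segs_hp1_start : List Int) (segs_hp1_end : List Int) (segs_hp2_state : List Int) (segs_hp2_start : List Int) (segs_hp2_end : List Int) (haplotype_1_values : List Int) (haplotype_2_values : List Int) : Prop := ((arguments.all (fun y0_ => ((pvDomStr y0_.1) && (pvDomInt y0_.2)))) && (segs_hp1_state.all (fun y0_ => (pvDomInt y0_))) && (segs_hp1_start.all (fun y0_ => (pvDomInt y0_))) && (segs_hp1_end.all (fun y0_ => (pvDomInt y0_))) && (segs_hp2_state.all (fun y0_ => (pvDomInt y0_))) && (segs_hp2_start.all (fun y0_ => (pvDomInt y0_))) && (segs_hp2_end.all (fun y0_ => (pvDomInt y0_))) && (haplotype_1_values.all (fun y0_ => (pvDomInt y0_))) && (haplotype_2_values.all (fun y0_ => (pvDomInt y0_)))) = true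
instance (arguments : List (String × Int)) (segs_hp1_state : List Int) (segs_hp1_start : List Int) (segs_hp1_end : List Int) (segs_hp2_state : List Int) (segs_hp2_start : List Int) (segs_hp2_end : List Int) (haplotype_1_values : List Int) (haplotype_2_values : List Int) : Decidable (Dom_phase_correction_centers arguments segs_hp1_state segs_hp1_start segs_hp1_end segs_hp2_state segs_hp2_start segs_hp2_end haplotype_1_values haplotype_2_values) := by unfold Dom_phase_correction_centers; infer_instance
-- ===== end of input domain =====

-- B selects each haplotype's dominant state by one linear scan (instead of sort + [-1]) and applies the
-- swaps from one flat bin-index list (instead of two nested conditional loops); return value proved equal,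
-- and both Pythons perform the same in-place swaps on the two haplotype value lists.

-- ===== PORT A =====
-- arguments['bin_size'], totalised with a default; Pre_ excludes the KeyError (missing key) case
def pvBinSize (arguments : List (String × Int)) : Int :=
  ((PySem.Dict.mk arguments).get? "bin_size").getD 1

-- the identical four swap lines both Pythons contain:
-- new_hp2 = hp2[i]; new_hp1 = hp1[i]; hp1[i] = new_hp2; hp2[i] = new_hp1
-- (pyGet?/pySetD are exact incl. negative-index wraparound; the IndexError case is excluded by Pre_)
def pvSwap (p : List Int × List Int) (i : Int) : List Int × List Int :=
  let new_hp2 := (PySem.List.pyGet? p.2 i).getD 0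
  let new_hp1 := (PySem.List.pyGet? p.1 i).getD 0
  (PySem.List.pySetD p.1 i new_hp2, PySem.List.pySetD p.2 i new_hp1)

def phase_correction_centers (arguments : List (String × Int)) (segs_hp1_state : List Int) (segs_hp1_start : List Int) (segs_hp1_end : List Int) (segs_hp2_state : List Int) (segs_hp2_start : List Int) (segs_hp2_end : List Int) (haplotype_1_values : List Int) (haplotype_2_values : List Int) : List Int × List Int × Bool :=
  -- diff_hp1.append([end - start, index, state]); diff_hp1.sort(key=...); max_diff_hp1 = diff_hp1[-1]
  let diff_hp1 : List (Int × Int × Int) :=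
    ((((segs_hp1_start.zip segs_hp1_end).zip segs_hp1_state).zipIdx).foldl
      (fun acc q => acc ++ [(q.1.1.2 - q.1.1.1, ((q.2 : Int), q.1.2))]) [])
  let max_diff_hp1 :=
    (PySem.List.pyGet? (PySem.List.sorted diff_hp1 (fun t => t.1) false) (-1)).getD (0, (0, 0))
  let diff_hp2 : List (Int × Int × Int) :=
    ((((segs_hp2_start.zip segs_hp2_end).zip segs_hp2_state).zipIdx).foldl
      (fun acc q => acc ++ [(q.1.1.2 - q.1.1.1, ((q.2 : Int), q.1.2))]) [])
  let max_diff_hp2 :=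
    (PySem.List.pyGet? (PySem.List.sorted diff_hp2 (fun t => t.1) false) (-1)).getD (0, (0, 0))
  if !(max_diff_hp1.2.2 == max_diff_hp2.2.2) then
    -- first loop: over zip(segs_hp2_start, segs_hp2_end, segs_hp2_state) (enumerate index unused)
    let p1 := ((segs_hp2_start.zip segs_hp2_end).zip segs_hp2_state).foldl
      (fun p seg =>
        if seg.2 == max_diff_hp1.2.2 then
          (PySem.List.pyRange (PySem.Int.floordiv seg.1.1 (pvBinSize arguments))
            (PySem.Int.floordiv seg.1.2 (pvBinSize arguments)) 1).foldl pvSwap p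
        else p) (haplotype_1_values, haplotype_2_values)
    -- second loop: over zip(segs_hp1_start, segs_hp1_end, segs_hp1_state)
    let p2 := ((segs_hp1_start.zip segs_hp1_end).zip segs_hp1_state).foldl
      (fun p seg =>
        if seg.2 == max_diff_hp2.2.2 then
          (PySem.List.pyRange (PySem.Int.floordiv seg.1.1 (pvBinSize arguments))
            (PySem.Int.floordiv seg.1.2 (pvBinSize arguments)) 1).foldl pvSwap p
        else p) p1
    (p2.1, p2.2, true)
  else (haplotype_1_values, haplotype_2_values, false)

-- ===== PORT B =====
-- dominant_state: one linear pass, ties keep the LAST largest segment (>=); None on empty input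
def pvBestState (starts ends states : List Int) : Option Int :=
  (((starts.zip ends).zip states).foldl
    (fun best seg =>
      match best with
      | none => some (seg.1.2 - seg.1.1, seg.2)
      | some b => if seg.1.2 - seg.1.1 ≥ b.1 then some (seg.1.2 - seg.1.1, seg.2) else some b)
    none).map (fun b => b.2)

def phase_correction_centers_alt (arguments : List (String × Int)) (segs_hp1_state : List Int) (segs_hp1_start : List Int) (segs_hp1_end : List Int) (segs_hp2_state : List Int) (segs_hp2_start : List Int) (segs_hp2_end : List Int) (haplotype_1_values : List Int) (haplotype_2_values : List Int) : List Int × List Int × Bool :=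
  let best_state_hp1 := pvBestState segs_hp1_start segs_hp1_end segs_hp1_state
  let best_state_hp2 := pvBestState segs_hp2_start segs_hp2_end segs_hp2_state
  let processed := !(best_state_hp1 == best_state_hp2)
  if processed then
    -- the two flat list comprehensions collecting every bin index to swap
    let bins : List Int :=
      (((segs_hp2_start.zip segs_hp2_end).zip segs_hp2_state).flatMap
        (fun seg =>
          if some seg.2 == best_state_hp1 then
            PySem.List.pyRange (PySem.Int.floordiv seg.1.1 (pvBinSize arguments))
              (PySem.Int.floordiv seg.1.2 (pvBinSize arguments)) 1
          else [])) ++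
      (((segs_hp1_start.zip segs_hp1_end).zip segs_hp1_state).flatMap
        (fun seg =>
          if some seg.2 == best_state_hp2 then
            PySem.List.pyRange (PySem.Int.floordiv seg.1.1 (pvBinSize arguments))
              (PySem.Int.floordiv seg.1.2 (pvBinSize arguments)) 1
          else []))
    let p := bins.foldl pvSwap (haplotype_1_values, haplotype_2_values)
    (p.1, p.2, true)
  else (haplotype_1_values, haplotype_2_values, false)

-- ===== PRECONDITION & SPEC =====
-- Pre_ holds exactly where the Python A returns: both zipped segment lists nonempty (else IndexError on
-- diff[-1]); and if the two dominant states differ and some segment is to be swapped, 'bin_size' must be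
-- present (KeyError) and nonzero (ZeroDivisionError) and every visited bin index must be a valid Python
-- index of both haplotype value lists (IndexError).  Which segments are visited genuinely depends on the
-- dominant states, hence the pvBestState references.
def pvPre (arguments : List (String × Int)) (segs_hp1_state : List Int) (segs_hp1_start : List Int) (segs_hp1_end : List Int) (segs_hp2_state : List Int) (segs_hp2_start : List Int) (segs_hp2_end : List Int) (haplotype_1_values : List Int) (haplotype_2_values : List Int) : Bool :=
  !((segs_hp1_start.zip segs_hp1_end).zip segs_hp1_state).isEmpty &&
  !((segs_hp2_start.zip segs_hp2_end).zip segs_hp2_state).isEmpty &&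
  (pvBestState segs_hp1_start segs_hp1_end segs_hp1_state ==
     pvBestState segs_hp2_start segs_hp2_end segs_hp2_state ||
   (let m := ((segs_hp2_start.zip segs_hp2_end).zip segs_hp2_state).filter
               (fun seg => some seg.2 == pvBestState segs_hp1_start segs_hp1_end segs_hp1_state) ++
             ((segs_hp1_start.zip segs_hp1_end).zip segs_hp1_state).filter
               (fun seg => some seg.2 == pvBestState segs_hp2_start segs_hp2_end segs_hp2_state)
    m.isEmpty ||
    (match (PySem.Dict.mk arguments).get? "bin_size" with
     | none => false
     | some bs =>
       bs != 0 && m.all (fun seg =>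
         (PySem.List.pyRange (PySem.Int.floordiv seg.1.1 bs) (PySem.Int.floordiv seg.1.2 bs) 1).all
           (fun i => decide (-(haplotype_1_values.length : Int) ≤ i) &&
                     decide (i < haplotype_1_values.length) &&
                     decide (-(haplotype_2_values.length : Int) ≤ i) &&
                     decide (i < haplotype_2_values.length))))))

def Pre_phase_correction_centers (arguments : List (String × Int)) (segs_hp1_state : List Int) (segs_hp1_start : List Int) (segs_hp1_end : List Int) (segs_hp2_state : List Int) (segs_hp2_start : List Int) (segs_hp2_end : List Int) (haplotype_1_values : List Int) (haplotype_2_values : List Int) : Prop :=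
  pvPre arguments segs_hp1_state segs_hp1_start segs_hp1_end segs_hp2_state segs_hp2_start segs_hp2_end haplotype_1_values haplotype_2_values = true

instance (arguments : List (String × Int)) (segs_hp1_state : List Int) (segs_hp1_start : List Int) (segs_hp1_end : List Int) (segs_hp2_state : List Int) (segs_hp2_start : List Int) (segs_hp2_end : List Int) (haplotype_1_values : List Int) (haplotype_2_values : List Int) : Decidable (Pre_phase_correction_centers arguments segs_hp1_state segs_hp1_start segs_hp1_end segs_hp2_state segs_hp2_start segs_hp2_end haplotype_1_values haplotype_2_values) := by unfold Pre_phase_correction_centers; infer_instance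

def pvWitness_phase_correction_centers : (List (String × Int)) × List Int × List Int × List Int × List Int × List Int × List Int × List Int × List Int :=
  ([("bin_size", 1)], [0], [0], [2], [0], [0], [2], [5, 6], [7, 8])

def Spec_phase_correction_centers (arguments : List (String × Int)) (segs_hp1_state : List Int) (segs_hp1_start : List Int) (segs_hp1_end : List Int) (segs_hp2_state : List Int) (segs_hp2_start : List Int) (segs_hp2_end : List Int) (haplotype_1_values : List Int) (haplotype_2_values : List Int) (out : List Int × List Int × Bool) : Prop := out = phase_correction_centers_alt arguments segs_hp1_state segs_hp1_start segs_hp1_end segs_hp2_state segs_hp2_start segs_hp2_end haplotype_1_values haplotype_2_values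
instance (arguments : List (String × Int)) (segs_hp1_state : List Int) (segs_hp1_start : List Int) (segs_hp1_end : List Int) (segs_hp2_state : List Int) (segs_hp2_start : List Int) (segs_hp2_end : List Int) (haplotype_1_values : List Int) (haplotype_2_values : List Int) (out : List Int × List Int × Bool) : Decidable (Spec_phase_correction_centers arguments segs_hp1_state segs_hp1_start segs_hp1_end segs_hp2_state segs_hp2_start segs_hp2_end haplotype_1_values haplotype_2_values out) := by unfold Spec_phase_correction_centers; infer_instance

-- ===== CLAIM (what is proved, stated in full; the proofs are below) =====
def Claim_equal_phase_correction_centers : Prop := ∀ (arguments : List (String × Int)) (segs_hp1_state : List Int) (segs_hp1_start : List Int) (segs_hp1_end : List Int) (segs_hp2_state : List Int) (segs_hp2_start : List Int) (segs_hp2_end : List Int) (haplotype_1_values : List Int) (haplotype_2_values : List Int), Dom_phase_correction_centers arguments segs_hp1_state segs_hp1_start segs_hp1_end segs_hp2_state segs_hp2_start segs_hp2_end haplotype_1_values haplotype_2_values → Pre_phase_correction_centers arguments segs_hp1_state segs_hp1_start segs_hp1_end segs_hp2_state segs_hp2_start segs_hp2_end haplotype_1_values haplotype_2_values → Spec_phase_correction_centers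 arguments segs_hp1_state segs_hp1_start segs_hp1_end segs_hp2_state segs_hp2_start segs_hp2_end haplotype_1_values haplotype_2_values (phase_correction_centers arguments segs_hp1_state segs_hp1_start segs_hp1_end segs_hp2_state segs_hp2_start segs_hp2_end haplotype_1_values haplotype_2_values)

-- ===== LEMMAS AND PROOFS =====

-- the linear scan, abstracted over the key: last element attaining the maximal key
def pvScan {α : Type} (key : α → Int) (l : List α) : Option α :=
  l.foldl (fun b x =>
    match b with
    | none => some x
    | some m => if key x ≥ key m then some x else some m) none

lemma pvScan_append_singleton {α : Type} (key : α → Int) (l : List α) (x : α) :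
    pvScan key (l ++ [x]) = some (match pvScan key l with
      | none => x
      | some m => if key x ≥ key m then x else m) := by
  unfold pvScan
  rw [List.foldl_append]
  cases h : List.foldl (fun b x =>
    match b with
    | none => some x
    | some m => if key x ≥ key m then some x else some m) none l with
  | none => rfl
  | some m =>
    show (if key x ≥ key m then some x else some m) = some (if key x ≥ key m then x else m)
    split <;> rfl

lemma getLast?_cons_of_ne {α : Type} (a : α) (l : List α) (h : l ≠ []) :
    (a :: l).getLast? = l.getLast? := by
  rw [List.getLast?_cons]
  cases hl : l.getLast? with
  | none => exact absurd (List.getLast?_eq_none_iff.mp hl) h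
  | some m => simp

lemma getLast?_insertBy {α : Type} (key : α → Int) (x : α) :
    ∀ (ys : List α), ys.Pairwise (fun a b => key a ≤ key b) →
    (PySem.List.insertBy (fun a b => decide (key a < key b)) x ys).getLast? =
      some (match ys.getLast? with
        | none => x
        | some m => if key x ≥ key m then x else m) := by
  intro ys
  induction ys with
  | nil => intro _; simp [PySem.List.insertBy]
  | cons y ys ih =>
    intro hp
    rw [List.pairwise_cons] at hp
    obtain ⟨hy, hp'⟩ := hp
    by_cases hxy : key x < key y
    · have hins : PySem.List.insertBy (fun a b => decide (key a < key b)) x (y :: ys) = x :: y :: ys := by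
        simp [PySem.List.insertBy, hxy]
      rw [hins]
      have hne : (y :: ys) ≠ ([] : List α) := by simp
      have hlast := List.getLast?_eq_some_getLast hne
      rw [List.getLast?_cons_cons, hlast]
      have hmem : (y :: ys).getLast hne ∈ (y :: ys) := List.getLast_mem _
      have hyle : key y ≤ key ((y :: ys).getLast hne) := by
        rcases List.mem_cons.mp hmem with h | h
        · have := congrArg key h
          omega
        · exact hy _ h
      have hnot : ¬ key x ≥ key ((y :: ys).getLast hne) := by omega
      simp [hnot]
    · have hins : PySem.List.insertBy (fun a b => decide (key a < key b)) x (y :: ys) =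
          y :: PySem.List.insertBy (fun a b => decide (key a < key b)) x ys := by
        simp [PySem.List.insertBy, hxy]
      rw [hins]
      have hne : PySem.List.insertBy (fun a b => decide (key a < key b)) x ys ≠ [] := by
        intro h
        have hx : x ∈ PySem.List.insertBy (fun a b => decide (key a < key b)) x ys :=
          (PySem.List.mem_insertBy _ _ _ _).mpr (Or.inl rfl)
        rw [h] at hx
        exact absurd hx (List.not_mem_nil)
      rw [getLast?_cons_of_ne _ _ hne, ih hp']
      cases hys : ys.getLast? with
      | none =>
        have : ys = [] := List.getLast?_eq_none_iff.mp hys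
        subst this
        have hge : key x ≥ key y := by omega
        simp [hge]
      | some m =>
        have : (y :: ys).getLast? = some m := by
          have : ys ≠ [] := by intro h; rw [h] at hys; simp at hys
          rw [getLast?_cons_of_ne _ _ this, hys]
        rw [this]

lemma sorted_getLast?_eq_pvScan {α : Type} (key : α → Int) (l : List α) :
    (PySem.List.sorted l key false).getLast? = pvScan key l := by
  induction l using List.reverseRecOn with
  | nil => rfl
  | append_singleton l x ih =>
    have hs : PySem.List.sorted (l ++ [x]) key false =
        PySem.List.insertBy (fun a b => decide (key a < key b)) x (PySem.List.sorted l key false) := by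
      rw [PySem.List.sorted_eq_foldl_insertBy, PySem.List.sorted_eq_foldl_insertBy, List.foldl_append]
      rfl
    rw [pvScan_append_singleton, hs,
      getLast?_insertBy key x _ (PySem.List.sorted_pairwise l key), ih]

lemma pvScan_eq_none_iff {α : Type} (key : α → Int) (l : List α) :
    pvScan key l = none ↔ l = [] := by
  rw [← sorted_getLast?_eq_pvScan, List.getLast?_eq_none_iff, PySem.List.sorted_eq_nil_iff]

lemma pvScan_map {α β : Type} (f : α → β) (k1 : α → Int) (k2 : β → Int)
    (hk : ∀ a, k2 (f a) = k1 a) (l : List α) :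
    pvScan k2 (l.map f) = (pvScan k1 l).map f := by
  unfold pvScan
  rw [List.foldl_map]
  have aux : ∀ (b : Option α),
      List.foldl (fun acc a =>
        match acc with
        | none => some (f a)
        | some m => if k2 (f a) ≥ k2 m then some (f a) else some m) (b.map f) l =
      (List.foldl (fun acc a =>
        match acc with
        | none => some a
        | some m => if k1 a ≥ k1 m then some a else some m) b l).map f := by
    induction l with
    | nil => intro b; rfl
    | cons a l ihl =>
      intro b
      simp only [List.foldl_cons]
      have hstep : (match b.map f with
          | none => some (f a)
          | some m => if k2 (f a) ≥ k2 m then some (f a) else some m) =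
          (match b with
          | none => some a
          | some m => if k1 a ≥ k1 m then some a else some m).map f := by
        cases b with
        | none => rfl
        | some m =>
          show (if k2 (f a) ≥ k2 (f m) then some (f a) else some (f m)) =
            (if k1 a ≥ k1 m then some a else some m).map f
          rw [hk a, hk m]
          by_cases h : k1 a ≥ k1 m <;> simp [h]
      rw [hstep, ihl]
  exact aux none

lemma foldl_nested_flat {γ σ : Type} (c : γ → Bool) (r : γ → List Int) (f : σ → Int → σ) :
    ∀ (l : List γ) (p : σ),
    l.foldl (fun p seg => if c seg then (r seg).foldl f p else p) p =
      (l.flatMap (fun seg => if c seg then r seg else [])).foldl f p := by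
  intro l
  induction l with
  | nil => intro p; simp
  | cons a l ih =>
    intro p
    simp only [List.foldl_cons, List.flatMap_cons, List.foldl_append]
    by_cases h : c a <;> simp [h, ih]

lemma dominant_vs_sorted (starts ends states : List Int)
    (h : (starts.zip ends).zip states ≠ []) :
    pvBestState starts ends states =
      some (((PySem.List.pyGet? (PySem.List.sorted
        ((((starts.zip ends).zip states).zipIdx).foldl
          (fun acc q => acc ++ [(q.1.1.2 - q.1.1.1, ((q.2 : Int), q.1.2))]) [])
        (fun t => t.1) false) (-1)).getD (0, (0, 0))).2.2) := by
  rw [PySem.List.foldl_append_singleton_eq_map, List.nil_append, PySem.List.pyGet?_neg_one,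
    sorted_getLast?_eq_pvScan,
    pvScan_map (fun q : ((Int × Int) × Int) × Nat => (q.1.1.2 - q.1.1.1, ((q.2 : Int), q.1.2)))
      (fun q => q.1.1.2 - q.1.1.1) (fun t => t.1) (fun a => rfl)]
  have hB : pvBestState starts ends states =
      (pvScan (fun t : Int × Int => t.1)
        (((starts.zip ends).zip states).map (fun seg => (seg.1.2 - seg.1.1, seg.2)))).map
        (fun b => b.2) := by
    unfold pvBestState pvScan
    rw [List.foldl_map]
    apply congrArg
    apply PySem.List.foldl_congr_mem
    intro acc y _
    cases acc <;> rfl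
  have hz : (starts.zip ends).zip states = (((starts.zip ends).zip states).zipIdx).map Prod.fst := by
    simp
  have hL : pvScan (fun seg : (Int × Int) × Int => seg.1.2 - seg.1.1) ((starts.zip ends).zip states) =
      (pvScan (fun q : ((Int × Int) × Int) × Nat => q.1.1.2 - q.1.1.1)
        (((starts.zip ends).zip states).zipIdx)).map Prod.fst := by
    conv_lhs => rw [hz]
    rw [pvScan_map (Prod.fst : ((Int × Int) × Int) × Nat → (Int × Int) × Int)
      (fun q => q.1.1.2 - q.1.1.1) (fun seg => seg.1.2 - seg.1.1) (fun a => rfl)]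
  rw [hB,
    pvScan_map (fun seg : (Int × Int) × Int => (seg.1.2 - seg.1.1, seg.2))
      (fun seg => seg.1.2 - seg.1.1) (fun t : Int × Int => t.1) (fun a => rfl), hL]
  cases hm : pvScan (fun q : ((Int × Int) × Int) × Nat => q.1.1.2 - q.1.1.1)
      (((starts.zip ends).zip states).zipIdx) with
  | none =>
    exfalso
    have : ((starts.zip ends).zip states).zipIdx = [] := (pvScan_eq_none_iff _ _).mp hm
    exact h (List.zipIdx_eq_nil_iff.mp this)
  | some m => rfl

-- ===== VERDICT (by name: the statement is the Claim_ definition above) =====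
theorem phase_correction_centers_spec : Claim_equal_phase_correction_centers := by
  intro arguments s1s s1a s1e s2s s2a s2e hp1 hp2 hdom hpre
  unfold Spec_phase_correction_centers
  have h1 : (s1a.zip s1e).zip s1s ≠ [] := by
    intro h
    unfold Pre_phase_correction_centers pvPre at hpre
    rw [h] at hpre
    simp at hpre
  have h2 : (s2a.zip s2e).zip s2s ≠ [] := by
    intro h
    unfold Pre_phase_correction_centers pvPre at hpre
    rw [h] at hpre
    simp at hpre
  have hA1 := dominant_vs_sorted s1a s1e s1s h1
  have hA2 := dominant_vs_sorted s2a s2e s2s h2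
  simp only [phase_correction_centers, phase_correction_centers_alt]
  rw [hA1, hA2]
  simp only [Option.some_beq_some]
  split
  · rw [foldl_nested_flat, foldl_nested_flat, ← List.foldl_append]
    rfl
  · rfl
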